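-- pv_equiv track=rewrite | github.com/rgdevengineer/Python-Programs-Daily | My-GFG-Solutions/count_the_specials.py | countSpecials
-- ===== SOURCE A (Python) =====
-- from collections import Counter
--
-- def countSpecials(k, arr):
--     n = len(arr)
--     target = n // k  # floor(n / k)
--
--     freq = Counter(arr)  # Count frequency of each element
--
--     count = 0
--     for val in freq.values():
--         if val == target:
--             count += 1
--
--     return count
-- ===== SOURCE B (Python) =====
-- def countSpecials(k, arr):
--     target = len(arr) // k
--     s = sorted(arr)
--     n = len(s)
--     count = 0
--     i = 0
--     while i < n:
--         j = i + 1
--         while j < n and s[j] == s[i]: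
--             j += 1
--         if j - i == target:
--             count += 1
--         i = j
--     return count
-- ===== Notes on version B (the rewrite author's own statement) =====
-- stated objective: alternative
-- what changed: Replaced the Counter/dict frequency table with sorting a copy and one linear scan over consecutive equal runs, counting runs whose length equals len(arr)//k.
-- outside the precondition, e.g. on countSpecials(0, [1, 2]): A raises ZeroDivisionError, B raises ZeroDivisionError
import Mathlib
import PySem

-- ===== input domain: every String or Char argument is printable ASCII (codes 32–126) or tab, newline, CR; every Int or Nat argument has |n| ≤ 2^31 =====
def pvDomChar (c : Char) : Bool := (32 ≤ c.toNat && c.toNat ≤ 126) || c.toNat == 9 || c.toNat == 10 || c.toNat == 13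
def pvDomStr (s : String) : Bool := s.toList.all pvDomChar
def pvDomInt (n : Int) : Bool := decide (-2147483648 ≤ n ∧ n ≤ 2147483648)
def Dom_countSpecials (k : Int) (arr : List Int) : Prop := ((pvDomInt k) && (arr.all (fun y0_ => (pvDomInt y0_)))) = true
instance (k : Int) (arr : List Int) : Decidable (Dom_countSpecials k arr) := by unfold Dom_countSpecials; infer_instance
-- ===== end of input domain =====

-- B replaces A's Counter frequency table by sorting a copy and scanning consecutive equal runs once (alternative algorithm, same results).


-- ===== PORT A =====
-- Literal port of A: n = len(arr); target = n // k; freq = Counter(arr); loop over freq.values() counting values equal to target.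
def countSpecials (k : Int) (arr : List Int) : Int :=
  let n : Int := arr.length
  let target : Int := PySem.Int.floordiv n k
  let freq : PySem.Dict Int Int := PySem.Dict.counter arr
  freq.values.foldl (fun count val => if val == target then count + 1 else count) 0

-- ===== PORT B =====
-- B's scan over the sorted copy: each step consumes one maximal run of equal elements
-- (inner `while j < n and s[j] == s[i]` = takeWhile/dropWhile on the tail), bumping count when the run length equals target.
def csLoop (t : Int) (s : List Int) (count : Int) : Int :=
  match s with
  | [] => count
  | x :: xs =>
      csLoop t (xs.dropWhile (· == x))
        (count + (if ((1 : Int) + ((xs.takeWhile (· == x)).length : Int)) == t then 1 else 0))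
termination_by s.length
decreasing_by
  simp only [List.length_cons]
  exact Nat.lt_succ_of_le (List.Sublist.length_le (List.dropWhile_sublist _))

def countSpecials_alt (k : Int) (arr : List Int) : Int :=
  let target : Int := PySem.Int.floordiv (arr.length : Int) k
  csLoop target (PySem.List.sorted arr (fun x => x) false) 0

-- ===== PRECONDITION & SPEC =====
-- k = 0 is excluded: both A and B raise ZeroDivisionError there (len(arr) // k).
def Pre_countSpecials (k : Int) (arr : List Int) : Prop := k ≠ 0
instance (k : Int) (arr : List Int) : Decidable (Pre_countSpecials k arr) := by unfold Pre_countSpecials; infer_instance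
def pvWitness_countSpecials : Int × List Int := (2, [1, 2, 2])

def Spec_countSpecials (k : Int) (arr : List Int) (out : Int) : Prop := out = countSpecials_alt k arr
instance (k : Int) (arr : List Int) (out : Int) : Decidable (Spec_countSpecials k arr out) := by unfold Spec_countSpecials; infer_instance

-- ===== CLAIM (what is proved, stated in full; the proofs are below) =====
def Claim_equal_countSpecials : Prop := ∀ (k : Int) (arr : List Int), Dom_countSpecials k arr → Pre_countSpecials k arr → Spec_countSpecials k arr (countSpecials k arr)

-- ===== LEMMAS AND PROOFS =====

-- Prepending an element absent from l commutes with folding Set.add over l.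
theorem foldl_add_cons_of_forall_ne (l : List Int) (x : Int) (s : List Int)
    (h : ∀ y ∈ l, y ≠ x) :
    l.foldl PySem.Set.add (x :: s) = x :: l.foldl PySem.Set.add s := by
  induction l generalizing s with
  | nil => rfl
  | cons y ys ih =>
      have hyx : y ≠ x := h y (by simp)
      simp only [List.foldl_cons]
      have hadd : PySem.Set.add (x :: s) y =
          x :: PySem.Set.add s y := by
        simp [PySem.Set.add, PySem.Set.contains, hyx]
        split_ifs <;> simp
      rw [hadd, ih _ (fun z hz => h z (by simp [hz]))]

-- A-side characterisation: A returns the number of distinct values of arr whose multiplicity is target.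
theorem countSpecials_eq_countP (k : Int) (arr : List Int) :
    countSpecials k arr =
      ((PySem.Set.ofList arr).countP
        (fun v => ((arr.count v : Int) == PySem.Int.floordiv (arr.length : Int) k)) : Int) := by
  unfold countSpecials
  simp only [PySem.Dict.values, PySem.Dict.items_counter]
  rw [List.map_map, PySem.List.foldl_beq_add_one]
  simp [List.count, List.countP_map, Function.comp_def]

-- B-side loop invariant: on a sorted list, csLoop counts distinct values of multiplicity t.
theorem csLoop_eq_countP (t : Int) : ∀ (s : List Int) (c : Int), s.Pairwise (· ≤ ·) →
    csLoop t s c = c + ((PySem.Set.ofList s).countP (fun v => ((s.count v : Int) == t)) : Int) := by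
  intro s c
  induction s, c using csLoop.induct t with
  | case1 c => intro _; simp [csLoop, PySem.Set.ofList]
  | case2 c x xs ih =>
      intro hs
      set r := xs.takeWhile (· == x) with hr
      set d := xs.dropWhile (· == x) with hd
      have hxsrd : xs = r ++ d := (List.takeWhile_append_dropWhile).symm
      have hxge : ∀ y ∈ xs, x ≤ y := by
        intro y hy; exact (List.pairwise_cons.mp hs).1 y hy
      have hdgt : ∀ y ∈ d, x < y := by
        intro y hy
        -- head of d is > x, and everything in d is ≥ head
        cases hcd : d with
        | nil => simp [hcd] at hy
        | cons h0 d' =>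
            have hh0ne : ¬ (h0 == x) = true := by
              have := List.head?_dropWhile_not (· == x) xs
              rw [← hd, hcd] at this; simpa using this
            have hh0mem : h0 ∈ xs := by
              have : h0 ∈ d := by simp [hcd]
              exact (List.dropWhile_sublist _).mem this
            have hh0gt : x < h0 := lt_of_le_of_ne (hxge h0 hh0mem) (by simpa using (Ne.symm (by simpa using hh0ne)))
            rw [hcd] at hy
            rcases List.mem_cons.mp hy with rfl | hy'
            · exact hh0gt
            · have hdpw' : (h0 :: d').Pairwise (· ≤ ·) := by
                have : d.Sublist xs := List.dropWhile_sublist _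
                rw [hcd] at this
                exact ((List.pairwise_cons.mp hs).2).sublist this
              exact lt_of_lt_of_le hh0gt ((List.pairwise_cons.mp hdpw').1 y hy')
      have hrx : ∀ y ∈ r, y = x := by
        intro y hy; have := List.mem_takeWhile_imp hy; simpa using this
      have hdne : ∀ y ∈ d, y ≠ x := fun y hy => ne_of_gt (hdgt y hy)
      -- distinct values of x :: xs = x :: distinct values of d
      have hset : PySem.Set.ofList (x :: xs) = x :: PySem.Set.ofList d := by
        show (x :: xs).foldl PySem.Set.add [] = x :: d.foldl PySem.Set.add []
        simp only [List.foldl_cons]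
        have h0 : PySem.Set.add ([] : List Int) x = [x] := rfl
        rw [h0, hxsrd, List.foldl_append]
        have hrfix : r.foldl PySem.Set.add [x] = [x] := by
          have : ∀ (l : List Int), (∀ y ∈ l, y = x) → l.foldl PySem.Set.add [x] = [x] := by
            intro l
            induction l with
            | nil => intro _; rfl
            | cons z zs ihz =>
                intro hz
                have hzx : z = x := hz z (by simp)
                simp only [List.foldl_cons]
                have : PySem.Set.add [x] z = [x] := by
                  simp [PySem.Set.add, PySem.Set.contains, hzx]
                rw [this]; exact ihz (fun y hy => hz y (by simp [hy]))
          exact this r hrx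
        rw [hrfix, foldl_add_cons_of_forall_ne d x [] hdne]
      -- count of x in x :: xs
      have hcx : (x :: xs).count x = 1 + r.length := by
        rw [hxsrd, List.count_cons]
        have hcr : r.count x = r.length := by
          rw [List.count_eq_length.mpr]; intro y hy; exact ((hrx y hy) ▸ rfl)
        have hcd0 : d.count x = 0 := by
          rw [List.count_eq_zero]; intro hx; exact (hdne x hx) rfl
        simp [List.count_append, hcr, hcd0]; omega
      -- counts of elements of d are unchanged
      have hcv : ∀ v ∈ d, (x :: xs).count v = d.count v := by
        intro v hv
        have hvx : v ≠ x := hdne v hv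
        rw [hxsrd, List.count_cons]
        have hcr0 : r.count v = 0 := by
          rw [List.count_eq_zero]; intro hvr; exact hvx (hrx v hvr)
        simp [List.count_append, hcr0, Ne.symm hvx]
      have hdpw : d.Pairwise (· ≤ ·) :=
        ((List.pairwise_cons.mp hs).2).sublist (List.dropWhile_sublist _)
      simp only [dite_eq_ite] at ih
      rw [csLoop, ih hdpw]
      rw [hset]
      rw [List.countP_cons]
      have hcongr : (PySem.Set.ofList d).countP (fun v => (((x :: xs).count v : Int) == t)) =
          (PySem.Set.ofList d).countP (fun v => ((d.count v : Int) == t)) := by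
        apply List.countP_congr
        intro v hv
        have hvd : v ∈ d := (PySem.Set.mem_ofList d v).mp hv
        rw [hcv v hvd]
      rw [hcongr]
      have hpx : (((x :: xs).count x : Int) == t) = (((1 : Int) + (r.length : Int)) == t) := by
        rw [hcx]; push_cast; rfl
      rw [hpx]
      push_cast
      split_ifs <;> ring

-- the distinct-value sets of a permutation pair are permutations of each other
theorem ofList_perm_of_perm (s arr : List Int) (hp : s.Perm arr) :
    (PySem.Set.ofList s).Perm (PySem.Set.ofList arr) := by
  apply List.perm_of_nodup_nodup_toFinset_eq (PySem.Set.nodup_ofList s) (PySem.Set.nodup_ofList arr)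
  ext v
  simp [List.mem_toFinset, PySem.Set.mem_ofList, hp.mem_iff]

-- ===== VERDICT (by name: the statement is the Claim_ definition above) =====
theorem countSpecials_spec : Claim_equal_countSpecials := by
  intro k arr _ _
  show countSpecials k arr = countSpecials_alt k arr
  set target : Int := PySem.Int.floordiv (arr.length : Int) k with ht
  set s : List Int := PySem.List.sorted arr (fun x => x) false with hsdef
  have hperm : s.Perm arr := PySem.List.sorted_perm arr (fun x => x) false
  have hpw : s.Pairwise (· ≤ ·) := by
    have := PySem.List.sorted_pairwise arr (fun x : Int => x)
    simpa using this
  have hB : countSpecials_alt k arr =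
      ((PySem.Set.ofList s).countP (fun v => ((s.count v : Int) == target)) : Int) := by
    unfold countSpecials_alt
    rw [← ht, ← hsdef, csLoop_eq_countP target s 0 hpw, zero_add]
  have hA := countSpecials_eq_countP k arr
  rw [hA, hB]
  have hc : (PySem.Set.ofList s).countP (fun v => ((s.count v : Int) == target)) =
      (PySem.Set.ofList s).countP (fun v => ((arr.count v : Int) == target)) := by
    apply List.countP_congr
    intro v _
    rw [hperm.count_eq]
  rw [hc]
  rw [(ofList_perm_of_perm s arr hperm).countP_eq]
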